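-- pv_equiv track=rewrite | github.com/KeironO/coding-errors | codingerrors/check.py | _check_rule_values
-- ===== SOURCE A (Python) =====
-- def _check_rule_values(values, icd10s):
--     mask_dict = {}
--
--     for value in values:
--         if value.endswith("X"):
--             truth = [x == value[:-1] for x in icd10s]
--         elif len(value) == 3:
--             truth = [x.startswith(value) for x in icd10s]
--         else:
--             truth = [value == x for x in icd10s]
--         if True in truth:
--             if value not in mask_dict:
--                 mask_dict[value] = []
--             mask_dict[value].append(truth)
--
--     return mask_dict
-- ===== SOURCE B (Python) =====
-- def _build_index(key, icd10s):
--     d = {}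
--     for i, x in enumerate(icd10s):
--         d.setdefault(key(x), []).append(i)
--     return d
--
--
-- def _check_rule_values(values, icd10s):
--     exact = _build_index(lambda x: x, icd10s)
--     pref = _build_index(lambda x: x[:3], icd10s)
--     n = len(icd10s)
--     mask_dict = {}
--     for value in values:
--         if value.endswith("X"):
--             idxs = exact.get(value[:-1])
--         elif len(value) == 3:
--             idxs = pref.get(value)
--         else:
--             idxs = exact.get(value)
--         if idxs is not None:
--             truth = [False] * n
--             for i in idxs:
--                 truth[i] = True
--             mask_dict.setdefault(value, []).append(truth)
--     return mask_dict
-- ===== Notes on version B (the rewrite author's own statement) =====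
-- stated objective: faster
-- what changed: B builds an inverted index once (code -> positions and 3-char-prefix -> positions); each value then becomes a single dict lookup and the boolean vector is assembled from the stored positions, instead of A's building a full boolean vector over icd10s and scanning it for True for every value.
import Mathlib
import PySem

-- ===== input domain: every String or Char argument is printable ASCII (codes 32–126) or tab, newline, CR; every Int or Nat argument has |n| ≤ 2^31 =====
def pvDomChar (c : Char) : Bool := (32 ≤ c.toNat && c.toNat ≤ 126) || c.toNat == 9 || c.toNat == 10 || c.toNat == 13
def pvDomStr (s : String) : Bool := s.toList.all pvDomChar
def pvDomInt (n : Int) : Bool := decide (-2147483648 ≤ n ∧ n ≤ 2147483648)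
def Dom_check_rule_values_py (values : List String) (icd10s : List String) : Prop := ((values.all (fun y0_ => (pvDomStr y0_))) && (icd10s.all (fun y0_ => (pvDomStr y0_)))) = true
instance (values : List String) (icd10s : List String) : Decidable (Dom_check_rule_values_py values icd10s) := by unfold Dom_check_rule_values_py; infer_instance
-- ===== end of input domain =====

-- B replaces A's per-value scan of icd10s by an inverted index built once (code → positions and
-- 3-char-prefix → positions); each value is one dict lookup, and the boolean vector is assembled
-- from the stored positions only when the value matches.

-- ===== PORT A =====
def check_rule_values_py (values : List String) (icd10s : List String) : List (String × List (List Bool)) :=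
  (values.foldl (fun (mask_dict : PySem.Dict String (List (List Bool))) value =>
      let truth : List Bool :=
        if PySem.Str.endswith value "X" then
          icd10s.map (fun x => x == PySem.Str.slice value none (some (-1)))
        else if PySem.Str.len value = 3 then
          icd10s.map (fun x => PySem.Str.startswith x value)
        else
          icd10s.map (fun x => value == x)
      if truth.contains true then
        let mask_dict := if !(mask_dict.contains value) then mask_dict.insert value [] else mask_dict
        mask_dict.modify value [] (fun l => l ++ [truth])
      else mask_dict)
    PySem.Dict.empty).items

-- ===== PORT B =====
-- helper of B: _build_index(key, icd10s) — dict mapping key(x) to the list of positions of x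
-- (Python's d.setdefault(k, []).append(i) is PySem.Dict.modify k [] (· ++ [i]))
def pvBuildIdx (key : String → String) (icd10s : List String) : PySem.Dict String (List Int) :=
  (PySem.List.enumerate icd10s 0).foldl
    (fun d p => d.modify (key p.2) [] (fun l => l ++ [p.1]))
    PySem.Dict.empty

def check_rule_values_py_alt (values : List String) (icd10s : List String) : List (String × List (List Bool)) :=
  let exact := pvBuildIdx (fun x => x) icd10s
  let pref := pvBuildIdx (fun x => PySem.Str.slice x none (some 3)) icd10s
  let n := icd10s.length
  (values.foldl (fun (mask_dict : PySem.Dict String (List (List Bool))) value =>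
      let idxs : Option (List Int) :=
        if PySem.Str.endswith value "X" then
          exact.get? (PySem.Str.slice value none (some (-1)))
        else if PySem.Str.len value = 3 then
          pref.get? value
        else
          exact.get? value
      match idxs with
      | none => mask_dict
      | some l =>
        let truth : List Bool :=
          l.foldl (fun t i => PySem.List.pySetD t i true) (List.replicate n false)
        mask_dict.modify value [] (fun ls => ls ++ [truth]))
    PySem.Dict.empty).items

-- ===== PRECONDITION & SPEC =====
def Spec_check_rule_values_py (values : List String) (icd10s : List String) (out : List (String × List (List Bool))) : Prop := out = check_rule_values_py_alt values icd10s
instance (values : List String) (icd10s : List String) (out : List (String × List (List Bool))) : Decidable (Spec_check_rule_values_py values icd10s out) := by unfold Spec_check_rule_values_py; infer_instance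

-- ===== CLAIM (what is proved, stated in full; the proofs are below) =====
def Claim_equal_check_rule_values_py : Prop := ∀ (values : List String) (icd10s : List String), Dom_check_rule_values_py values icd10s → Spec_check_rule_values_py values icd10s (check_rule_values_py values icd10s)

-- ===== LEMMAS AND PROOFS =====

-- the stored position list: getD of the index dict is the list of matching positions
theorem buildIdx_getD (key : String → String) (xs : List String) (k : String) :
    (pvBuildIdx key xs).getD k []
      = ((PySem.List.enumerate xs 0).filter (fun p => key p.2 == k)).map (fun p => p.1) := by
  have h : pvBuildIdx key xs
      = ((PySem.List.enumerate xs 0).map (fun p => (key p.2, p.1))).foldl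
          (fun d q => d.modify q.1 [] (fun l => l ++ [q.2])) PySem.Dict.empty := by
    rw [List.foldl_map]
    rfl
  rw [h, PySem.Dict.getD_foldl_modify_append]
  simp [List.filter_map, Function.comp_def]

-- the index dict contains k iff some element has key k
theorem buildIdx_contains (key : String → String) (xs : List String) (k : String) :
    (pvBuildIdx key xs).contains k = true ↔ ∃ x ∈ xs, key x = k := by
  have hk : (pvBuildIdx key xs).keys
      = PySem.Set.update PySem.Dict.empty.keys ((PySem.List.enumerate xs 0).map (fun p => key p.2)) :=
    PySem.Dict.keys_foldl_modify_key (PySem.List.enumerate xs 0) (fun p => key p.2) []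
      (fun _ p => fun l => l ++ [p.1]) PySem.Dict.empty
  have hmem : (pvBuildIdx key xs).contains k = true ↔ k ∈ (pvBuildIdx key xs).keys := by
    simp [PySem.Dict.contains, PySem.Dict.keys, List.any_eq_true]
  rw [hmem, hk]
  show k ∈ PySem.Set.ofList ((PySem.List.enumerate xs 0).map (fun p => key p.2)) ↔ _
  rw [PySem.Set.mem_ofList]
  have : (PySem.List.enumerate xs 0).map (fun p => key p.2) = xs.map key := by
    rw [show (fun (p : Int × String) => key p.2) = key ∘ (fun p => p.2) from rfl, ← List.map_map,
        PySem.List.map_snd_enumerate]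
  rw [this]
  simp

-- membership in the stored positions
theorem mem_buildIdx_getD (key : String → String) (xs : List String) (k : String) (j : Int) :
    j ∈ (pvBuildIdx key xs).getD k [] ↔
      ∃ (m : Nat), ∃ (h : m < xs.length), j = (m : Int) ∧ key xs[m] = k := by
  rw [buildIdx_getD]
  simp only [List.mem_map, List.mem_filter, PySem.List.mem_enumerate_iff]
  constructor
  · rintro ⟨p, ⟨⟨m, hm, rfl⟩, hkey⟩, rfl⟩
    exact ⟨m, hm, by simp, by simpa using hkey⟩
  · rintro ⟨m, hm, rfl, hkey⟩
    exact ⟨(0 + (m:Int), xs[m]), ⟨⟨m, hm, rfl⟩, by simpa using hkey⟩, by simp⟩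

theorem length_foldl_pySetD (l : List Int) (t0 : List Bool) :
    (l.foldl (fun t i => PySem.List.pySetD t i true) t0).length = t0.length := by
  induction l generalizing t0 with
  | nil => rfl
  | cons i l ih => simp [List.foldl_cons, ih, PySem.List.length_pySetD]

-- setting a list of nonnegative positions to true, elementwise
theorem getElem?_foldl_pySetD (l : List Int) (t0 : List Bool)
    (h0 : ∀ i ∈ l, 0 ≤ i) (j : Nat) (hj : j < t0.length) :
    (l.foldl (fun t i => PySem.List.pySetD t i true) t0)[j]?
      = some (if (j : Int) ∈ l then true else t0[j]) := by
  induction l generalizing t0 with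
  | nil => simp [hj]
  | cons i l ih =>
    have hi : 0 ≤ i := h0 i (by simp)
    have hset : PySem.List.pySetD t0 i true = t0.set i.toNat true :=
      PySem.List.pySetD_of_nonneg t0 true hi
    rw [List.foldl_cons, hset]
    rw [ih (t0.set i.toNat true) (fun x hx => h0 x (by simp [hx])) (by simpa using hj)]
    by_cases hmem : (j : Int) ∈ l
    · simp [hmem]
    · simp only [hmem, if_false, List.mem_cons, or_false]
      rw [List.getElem_set]
      by_cases he : i = (j : Int)
      · have h1 : i.toNat = j := by omega
        simp [he]
      · have h1 : i.toNat ≠ j := by omega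
        simp only [h1, if_false]
        rw [if_neg (fun h2 => he h2.symm)]

-- for a 3-char value, "x[:3] == value" is exactly "x.startswith(value)"
theorem slice3_eq_iff (x value : String) (h : value.toList.length = 3) :
    PySem.Str.slice x none (some 3) = value ↔ PySem.Str.startswith x value = true := by
  rw [PySem.Str.startswith, PySem.Chars.startswith, List.isPrefixOf_iff_prefix,
      List.prefix_iff_eq_take, h]
  rw [PySem.Str.slice, PySem.Chars.slice, PySem.List.slice_to x.toList (by norm_num : (0:Int) ≤ 3),
      String.ofList_eq]
  show x.toList.take 3 = value.toList ↔ value.toList = x.toList.take 3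
  exact eq_comm

-- the dict update: insert-if-absent-then-append equals modify-with-default-append
theorem dict_step_eq (d : PySem.Dict String (List (List Bool))) (value : String)
    (f : List (List Bool) → List (List Bool)) :
    ((if !(d.contains value) then d.insert value [] else d).modify value [] f)
      = d.modify value [] f := by
  by_cases h : d.contains value
  · simp [h]
  · have hany : (d.items.any fun p => p.1 == value) = false := Bool.eq_false_iff.mpr h
    have hfind : List.find? (fun p => p.1 == value) d.items = none := by
      rw [List.find?_eq_none]
      intro p hp
      simpa using List.any_eq_false.mp hany p hp
    have hmap : ∀ (w : String × List (List Bool)),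
        List.map (fun p => if p.1 = value then w else p) d.items = d.items := by
      intro w
      have : List.map (fun p => if p.1 = value then w else p) d.items = List.map id d.items := by
        apply List.map_congr_left
        intro p hp
        have hne : ¬ p.1 = value := by simpa using List.any_eq_false.mp hany p hp
        simp [hne]
      simpa using this
    simp only [h, Bool.not_false, if_true]
    simp [PySem.Dict.modify, PySem.Dict.insert, PySem.Dict.contains, hany, hfind,
          PySem.Dict.getD, PySem.Dict.get?, hmap]

-- A's boolean vector equals B's vector assembled from the stored positions
theorem truth_eq (xs : List String) (key : String → String) (k : String) (p : String → Bool)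
    (hp : ∀ x, p x = (key x == k)) :
    xs.map p = ((pvBuildIdx key xs).getD k []).foldl (fun t i => PySem.List.pySetD t i true)
                 (List.replicate xs.length false) := by
  set l := (pvBuildIdx key xs).getD k [] with hl
  have h0 : ∀ i ∈ l, 0 ≤ i := by
    intro i hi
    rcases (mem_buildIdx_getD key xs k i).mp hi with ⟨m, hm, rfl, _⟩
    positivity
  apply List.ext_getElem?
  intro j
  by_cases hj : j < xs.length
  · rw [getElem?_foldl_pySetD l _ h0 j (by simpa using hj)]
    rw [List.getElem?_map, List.getElem?_eq_getElem hj]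
    simp only [Option.map_some, Option.some.injEq]
    rw [hp]
    by_cases hk : key xs[j] = k
    · have : (j : Int) ∈ l := (mem_buildIdx_getD key xs k j).mpr ⟨j, hj, rfl, hk⟩
      simp [this, hk]
    · have : (j : Int) ∉ l := by
        intro hmem
        rcases (mem_buildIdx_getD key xs k _).mp hmem with ⟨m, hm, hjm, hkey⟩
        have : j = m := by exact_mod_cast hjm
        exact hk (this ▸ hkey)
      simp [this, hk]
  · rw [List.getElem?_eq_none (by simpa using hj), List.getElem?_eq_none]
    rw [length_foldl_pySetD]
    simpa using hj

-- A's build-vector-and-test step equals B's lookup step, for one branch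
theorem branch_eq (xs : List String) (key : String → String) (k : String) (p : String → Bool)
    (hp : ∀ x, p x = (key x == k)) (d : PySem.Dict String (List (List Bool))) (value : String) :
    (if (xs.map p).contains true then
       (if !(d.contains value) then d.insert value [] else d).modify value []
         (fun ls => ls ++ [xs.map p])
     else d)
    = (match (pvBuildIdx key xs).get? k with
       | none => d
       | some l => d.modify value []
           (fun ls => ls ++ [l.foldl (fun t i => PySem.List.pySetD t i true)
                               (List.replicate xs.length false)])) := by
  have hc : (xs.map p).contains true = (pvBuildIdx key xs).contains k := by
    rw [Bool.eq_iff_iff, List.contains_iff_mem, buildIdx_contains]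
    simp only [List.mem_map]
    constructor
    · rintro ⟨x, hx, hpx⟩
      exact ⟨x, hx, by simpa [hp] using hpx.symm⟩
    · rintro ⟨x, hx, hkx⟩
      exact ⟨x, hx, by simp [hp, hkx]⟩
  cases hg : (pvBuildIdx key xs).get? k with
  | none =>
    have : (pvBuildIdx key xs).contains k = false :=
      (PySem.Dict.get?_eq_none_iff_contains _ _).mp hg
    rw [hc, this]
    simp
  | some l =>
    have hcont : (pvBuildIdx key xs).contains k = true := by
      by_contra hfalse
      rw [(PySem.Dict.get?_eq_none_iff_contains _ _).mpr (Bool.eq_false_iff.mpr hfalse)] at hg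
      simp at hg
    have hl : l = (pvBuildIdx key xs).getD k [] := by
      rw [PySem.Dict.getD, hg]; rfl
    rw [hc, hcont]
    simp only [if_true]
    rw [dict_step_eq]
    rw [truth_eq xs key k p hp, ← hl]

-- ===== VERDICT (by name: the statement is the Claim_ definition above) =====
theorem check_rule_values_py_spec : Claim_equal_check_rule_values_py := by
  intro values icd10s _
  unfold Spec_check_rule_values_py check_rule_values_py check_rule_values_py_alt
  dsimp only
  congr 1
  apply PySem.List.foldl_congr_mem
  intro d value _
  by_cases h1 : PySem.Str.endswith value "X"
  · simp only [h1, if_true]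
    exact branch_eq icd10s (fun x => x) (PySem.Str.slice value none (some (-1)))
      (fun x => x == PySem.Str.slice value none (some (-1))) (fun _ => rfl) d value
  · by_cases h2 : PySem.Str.len value = 3
    · have hlen : value.toList.length = 3 := by
        have h3 := h2; rw [PySem.Str.len] at h3; exact_mod_cast h3
      have hp : ∀ x, PySem.Str.startswith x value = ((fun y => PySem.Str.slice y none (some 3)) x == value) := by
        intro x
        rw [Bool.eq_iff_iff, beq_iff_eq]
        exact (slice3_eq_iff x value hlen).symm
      simp only [h1, h2, if_true]
      exact branch_eq icd10s (fun x => PySem.Str.slice x none (some 3)) value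
        (fun x => PySem.Str.startswith x value) hp d value
    · have hp : ∀ x, (value == x) = ((fun y => y) x == value) := by
        intro x; rw [Bool.eq_iff_iff, beq_iff_eq, beq_iff_eq]; exact eq_comm
      simp only [h1, h2, if_false]
      exact branch_eq icd10s (fun x => x) value (fun x => value == x) hp d value
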